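-- pv_equiv track=rewrite | github.com/FantBlog/baekjoonhub | 백준/Gold/5904. Moo 게임/Moo 게임.py | moo
-- ===== SOURCE A (Python) =====
-- def moo(n):
--     count = 0
--     while True:
--         dp[count + 1] = 2 * dp[count] + count + 4
--         if dp[count + 1] > n:
--             break
--         count += 1
--     return count
--
-- dp = {0:3}
-- ===== SOURCE B (Python) =====
-- def moo(n):
--     # Level-k length of A's table has the closed form 8*2**k - k - 5
--     # (from dp[k+1] = 2*dp[k] + k + 4, dp[0] = 3); no dp table is kept.
--     k = 1
--     while 8 * (1 << k) - k - 5 <= n: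
--         k += 1
--     return k - 1
-- ===== Notes on version B (the rewrite author's own statement) =====
-- stated objective: simpler
-- what changed: B replaces A's persistent dp dict and incremental recurrence with the closed-form level length 8*2**k - k - 5, computed independently at each step via a bit shift.
import Mathlib
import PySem

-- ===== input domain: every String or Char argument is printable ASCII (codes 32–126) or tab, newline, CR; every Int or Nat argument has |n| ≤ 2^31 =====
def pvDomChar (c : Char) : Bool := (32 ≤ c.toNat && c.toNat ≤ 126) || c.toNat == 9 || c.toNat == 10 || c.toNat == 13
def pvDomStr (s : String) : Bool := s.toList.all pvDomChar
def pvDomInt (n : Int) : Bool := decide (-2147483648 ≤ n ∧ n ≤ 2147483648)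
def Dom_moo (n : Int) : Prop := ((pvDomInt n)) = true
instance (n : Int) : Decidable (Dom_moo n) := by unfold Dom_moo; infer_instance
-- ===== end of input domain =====

-- B replaces A's dp-dict recurrence with the closed-form level length 8*2^k - k - 5 (objective: simpler).
-- A mutates the module-global dp dict; the recomputed entries are identical on every call, so the return value is unaffected.

-- ===== PORT A =====
-- A's while loop: cur is dp[count]; dp[count+1] := 2*dp[count] + count + 4.
-- (hc is a termination invariant only; it carries no data.)
def mooAux (n : Int) (count : Nat) (cur : Int) (hc : 3 ≤ cur) : Int :=
  if 2 * cur + count + 4 > n then (count : Int)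
  else mooAux n (count + 1) (2 * cur + count + 4) (by omega)
termination_by (n + 1 - cur).toNat
decreasing_by omega

def moo (n : Int) : Int := mooAux n 0 3 (by norm_num)

-- ===== PORT B =====
-- port-level fact needed for bAux's termination (cited in decreasing_by)
theorem pv_pow_lb (k : Nat) : (k : Int) + 5 ≤ 7 * 2 ^ k := by
  induction k with
  | zero => norm_num
  | succ m ih =>
    have h1 : (0:Int) < 2 ^ m := by positivity
    have : (2:Int) ^ (m + 1) = 2 * 2 ^ m := by ring
    push_cast
    omega

def bAux (n : Int) (k : Nat) : Int :=
  if 8 * 2 ^ k - (k : Int) - 5 ≤ n then bAux n (k + 1)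
  else (k : Int) - 1
termination_by (n + 1 - 2 ^ k).toNat
decreasing_by
  have h1 := pv_pow_lb k
  omega

def moo_alt (n : Int) : Int := bAux n 1

-- ===== PRECONDITION & SPEC =====
def Spec_moo (n : Int) (out : Int) : Prop := out = moo_alt n
instance (n : Int) (out : Int) : Decidable (Spec_moo n out) := by unfold Spec_moo; infer_instance

-- ===== CLAIM (what is proved, stated in full; the proofs are below) =====
def Claim_equal_moo : Prop := ∀ (n : Int), Dom_moo n → Spec_moo n (moo n)

-- ===== LEMMAS AND PROOFS =====

-- A's loop value dp[count] equals the closed form; with that, each step of mooAux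
-- matches the step of bAux at index count+1.
theorem mooAux_eq_bAux (n : Int) (count : Nat) (cur : Int) (hc : 3 ≤ cur)
    (hcur : cur = 8 * 2 ^ count - (count : Int) - 5) :
    mooAux n count cur hc = bAux n (count + 1) := by
  fun_induction mooAux n count cur hc with
  | case1 count cur hc hgt =>
    rw [bAux]
    have hpow : (8 : Int) * 2 ^ (count + 1) - ((count : Int) + 1) - 5
        = 2 * cur + count + 4 := by rw [hcur]; ring
    push_cast
    rw [if_neg (by omega)]
    ring
  | case2 count cur hc hle ih =>
    rw [bAux]
    have hpow : (8 : Int) * 2 ^ (count + 1) - ((count : Int) + 1) - 5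
        = 2 * cur + count + 4 := by rw [hcur]; ring
    rw [if_pos (by push_cast at hpow ⊢; omega)]
    exact ih (by push_cast [hpow]; ring)

-- ===== VERDICT =====
theorem moo_spec : Claim_equal_moo := by
  intro n _
  unfold Spec_moo moo moo_alt
  exact mooAux_eq_bAux n 0 3 (by norm_num) (by norm_num)
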